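-- pv_equiv track=rewrite | github.com/Haseokheon/- | 파일변환_가족구성원_확인버튼.py | get_elements_after_keywords
-- ===== SOURCE A (Python) =====
-- def get_elements_after_keywords(data_array, keywords):
--     """배열에서 각 키워드 뒤의 원소를 변수로 저장합니다."""
--     results = {}
--     for keyword in keywords:
--         found = False
--         for i, element in enumerate(data_array):
--             if keyword in str(element):  # element를 문자열로 변환
--                 try:
--                     results[keyword] = data_array[i+1]
--                     found = True
--                     break
--                 except IndexError:
--                     results[keyword] = None
--                     found = True
--                     break
--         if not found:
--             results[keyword] = None
--     return results
-- ===== SOURCE B (Python) =====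
-- def get_elements_after_keywords(data_array, keywords):
--     """배열에서 각 키워드 뒤의 원소를 변수로 저장합니다."""
--     results = {k: None for k in keywords}
--     remaining = list(results)  # unresolved keywords, deduped, in order
--     for i, element in enumerate(data_array):
--         if not remaining:
--             break
--         s = str(element)
--         still = []
--         for k in remaining:
--             if k in s:
--                 results[k] = data_array[i + 1] if i + 1 < len(data_array) else None
--             else:
--                 still.append(k)
--         remaining = still
--     return results
-- ===== Notes on version B (the rewrite author's own statement) =====
-- stated objective: alternative
-- what changed: Replaces A's per-keyword rescan of the whole array by a single left-to-right sweep over the array that maintains the list of still-unresolved keywords (initialised as a prebuilt dict of all keywords mapped to None), breaking early once every keyword is resolved.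
import Mathlib
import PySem

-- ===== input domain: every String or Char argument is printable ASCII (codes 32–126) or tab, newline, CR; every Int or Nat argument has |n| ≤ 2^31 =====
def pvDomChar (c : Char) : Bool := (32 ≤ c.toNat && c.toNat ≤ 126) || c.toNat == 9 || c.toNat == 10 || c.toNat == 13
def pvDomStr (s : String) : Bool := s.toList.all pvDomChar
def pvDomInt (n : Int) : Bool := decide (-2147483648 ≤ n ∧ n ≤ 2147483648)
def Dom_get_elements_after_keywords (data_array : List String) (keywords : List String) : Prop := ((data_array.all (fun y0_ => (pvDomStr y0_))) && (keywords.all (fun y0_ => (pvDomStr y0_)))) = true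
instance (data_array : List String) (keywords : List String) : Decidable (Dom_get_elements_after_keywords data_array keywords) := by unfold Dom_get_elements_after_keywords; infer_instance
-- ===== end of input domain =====

-- B replaces A's per-keyword rescans of the array by one left-to-right sweep maintaining the unresolved keywords (alternative decomposition, same worst-case cost).

-- ===== PORT A =====
-- A's inner loop: scan data_array for the first element containing `keyword`; on a hit,
-- `data_array[i+1]` under try/except IndexError is exactly the head of the remaining tail
-- (some next element, or none when the hit is the last element).
def aInner (keyword : String) : List String → Option (Option String)
  | [] => none                                   -- loop fell through: found = False
  | element :: rest =>
      if PySem.Str.isIn keyword element then some rest.head?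
      else aInner keyword rest

def get_elements_after_keywords (data_array : List String) (keywords : List String) : List (String × Option String) :=
  (keywords.foldl (fun results keyword =>
      match aInner keyword data_array with
      | some v => results.insert keyword v       -- found: break with the stored value
      | none => results.insert keyword none)     -- if not found: results[keyword] = None
    PySem.Dict.empty).items

-- ===== PORT B =====
-- B's sweep: one pass over data_array; at each element, every still-unresolved keyword it
-- contains is assigned `data_array[i+1] if i+1 < len(data_array) else None` (= head of the tail,
-- passed in as `nxt`); the others are appended to `still`; the loop breaks once `remaining` is empty.
def bStep (element : String) (nxt : Option String)
    (p : PySem.Dict String (Option String) × List String) (k : String) :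
    PySem.Dict String (Option String) × List String :=
  if PySem.Str.isIn k element then (p.1.insert k nxt, p.2) else (p.1, p.2 ++ [k])

def bSweep (results : PySem.Dict String (Option String)) (remaining : List String) :
    List String → PySem.Dict String (Option String)
  | [] => results
  | element :: rest =>
    if remaining.isEmpty then results
    else
      bSweep (remaining.foldl (bStep element rest.head?) (results, [])).1
        (remaining.foldl (bStep element rest.head?) (results, [])).2 rest

def get_elements_after_keywords_alt (data_array : List String) (keywords : List String) : List (String × Option String) :=
  (bSweep
    (keywords.foldl (fun d k => d.insert k none) PySem.Dict.empty)   -- {k: None for k in keywords}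
    (PySem.List.dedup keywords)                                      -- list(results)
    data_array).items

-- ===== PRECONDITION & SPEC =====
def Spec_get_elements_after_keywords (data_array : List String) (keywords : List String) (out : List (String × Option String)) : Prop := out = get_elements_after_keywords_alt data_array keywords
instance (data_array : List String) (keywords : List String) (out : List (String × Option String)) : Decidable (Spec_get_elements_after_keywords data_array keywords out) := by unfold Spec_get_elements_after_keywords; infer_instance

-- ===== CLAIM (what is proved, stated in full; the proofs are below) =====
def Claim_equal_get_elements_after_keywords : Prop := ∀ (data_array : List String) (keywords : List String), Dom_get_elements_after_keywords data_array keywords → Spec_get_elements_after_keywords data_array keywords (get_elements_after_keywords data_array keywords)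

-- ===== LEMMAS AND PROOFS =====

-- A fold of inserts whose value depends only on the key: lookup afterwards.
theorem getD_foldl_insert_fn (f : String → Option String) (kws : List String)
    (d : PySem.Dict String (Option String)) (k : String) :
    (kws.foldl (fun d k => d.insert k (f k)) d).getD k none =
      if k ∈ kws then f k else d.getD k none := by
  induction kws generalizing d with
  | nil => simp
  | cons k' rest ih =>
      simp only [List.foldl_cons, ih, PySem.Dict.getD_insert, List.mem_cons]
      by_cases h1 : k ∈ rest <;> by_cases h2 : k = k' <;> simp [h1, h2]

-- The inner fold of bSweep: second component collects the non-matching keywords.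
theorem bStep_snd (element : String) (nxt : Option String) (rem : List String)
    (d : PySem.Dict String (Option String)) (acc : List String) :
    (rem.foldl (bStep element nxt) (d, acc)).2 =
      acc ++ rem.filter (fun k => !PySem.Str.isIn k element) := by
  induction rem generalizing d acc with
  | nil => simp
  | cons k rest ih =>
      simp only [List.foldl_cons, List.filter_cons, bStep]
      by_cases h : PySem.Str.isIn k element = true
      · rw [if_pos h, ih]
        simp [show PySem.Chars.isIn k.toList element.toList = true by simpa using h]
      · rw [if_neg h, ih]
        simp [show PySem.Chars.isIn k.toList element.toList = false by
          simpa using Bool.eq_false_iff.mpr h]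
-- The inner fold of bSweep: keys are unchanged when every keyword is already a key.
theorem bStep_keys (element : String) (nxt : Option String) (rem : List String)
    (d : PySem.Dict String (Option String)) (acc : List String)
    (hc : ∀ j ∈ rem, d.contains j = true) :
    (rem.foldl (bStep element nxt) (d, acc)).1.keys = d.keys := by
  induction rem generalizing d acc with
  | nil => rfl
  | cons k rest ih =>
      simp only [List.foldl_cons, bStep]
      by_cases h : PySem.Str.isIn k element = true
      · rw [if_pos h, ih (d.insert k nxt) acc]
        · exact PySem.Dict.keys_insert_of_contains _ _ (hc k (by simp))
        · intro j hj
          rw [PySem.Dict.contains_insert]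
          simp [hc j (List.mem_cons_of_mem _ hj)]
      · rw [if_neg h]
        exact ih d (acc ++ [k]) (fun j hj => hc j (List.mem_cons_of_mem _ hj))

-- The inner fold of bSweep: lookup after one element's step.
theorem bStep_getD (element : String) (nxt : Option String) (rem : List String)
    (d : PySem.Dict String (Option String)) (acc : List String) (k : String) :
    (rem.foldl (bStep element nxt) (d, acc)).1.getD k none =
      if k ∈ rem ∧ PySem.Str.isIn k element = true then nxt else d.getD k none := by
  induction rem generalizing d acc with
  | nil => simp
  | cons k' rest ih =>
      simp only [List.foldl_cons, bStep]
      by_cases h : PySem.Str.isIn k' element = true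
      · rw [if_pos h, ih, PySem.Dict.getD_insert]
        simp only [PySem.Str.isIn_eq, List.mem_cons]
        by_cases hin : PySem.Chars.isIn k.toList element.toList = true
        · by_cases hmem : k ∈ rest
          · simp [hin, hmem]
          · by_cases h2 : k = k'
            · subst h2
              simp [hin]
            · simp [hin, hmem, h2]
        · by_cases h2 : k = k'
          · subst h2
            exact absurd (show PySem.Chars.isIn k.toList element.toList = true by
              simpa using h) hin
          · simp [hin, h2]
      · rw [if_neg h, ih]
        simp only [PySem.Str.isIn_eq, List.mem_cons]
        by_cases hin : PySem.Chars.isIn k.toList element.toList = true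
        · by_cases hmem : k ∈ rest
          · simp [hin, hmem]
          · by_cases h2 : k = k'
            · subst h2
              exact absurd hin (by simpa using Bool.eq_false_iff.mpr h)
            · simp [hin, hmem, h2]
        · simp [hin]

-- The sweep keeps the key set.
theorem bSweep_keys (data : List String) :
    ∀ (d : PySem.Dict String (Option String)) (rem : List String),
    (∀ j ∈ rem, d.contains j = true) → (bSweep d rem data).keys = d.keys := by
  induction data with
  | nil => intro d rem _; rfl
  | cons element rest ih =>
      intro d rem hc
      by_cases he : rem.isEmpty = true
      · simp [bSweep, he]
      · simp only [bSweep]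
        rw [if_neg he, ih]
        · exact bStep_keys element rest.head? rem d [] hc
        · intro j hj
          rw [bStep_snd] at hj
          simp only [List.nil_append, List.mem_filter] at hj
          rw [PySem.Dict.contains_iff_mem_keys, bStep_keys element rest.head? rem d [] hc,
            ← PySem.Dict.contains_iff_mem_keys]
          exact hc j hj.1

-- The sweep's final lookup: a keyword still unresolved gets the first-match value.
theorem bSweep_getD (data : List String) :
    ∀ (d : PySem.Dict String (Option String)) (rem : List String) (k : String),
    (∀ j ∈ rem, d.contains j = true) →
    (bSweep d rem data).getD k none =
      if k ∈ rem then (aInner k data).getD (d.getD k none) else d.getD k none := by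
  induction data with
  | nil => intro d rem k _; simp [bSweep, aInner]
  | cons element rest ih =>
      intro d rem k hc
      by_cases he : rem.isEmpty = true
      · rw [List.isEmpty_iff] at he
        subst he
        simp [bSweep]
      · simp only [bSweep]
        rw [if_neg he]
        have hc' : ∀ j ∈ (rem.foldl (bStep element rest.head?) (d, [])).2,
            (rem.foldl (bStep element rest.head?) (d, [])).1.contains j = true := by
          intro j hj
          rw [bStep_snd] at hj
          simp only [List.nil_append, List.mem_filter] at hj
          rw [PySem.Dict.contains_iff_mem_keys, bStep_keys element rest.head? rem d [] hc,
            ← PySem.Dict.contains_iff_mem_keys]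
          exact hc j hj.1
        rw [ih _ _ k hc', bStep_snd, bStep_getD]
        simp only [List.nil_append, List.mem_filter]
        by_cases hmem : k ∈ rem
        · by_cases hin : PySem.Str.isIn k element = true
          · simp [hmem, aInner,
              show PySem.Chars.isIn k.toList element.toList = true by simpa using hin]
          · simp [hmem, aInner,
              show PySem.Chars.isIn k.toList element.toList = false by
                simpa using Bool.eq_false_iff.mpr hin]
        · simp [hmem]

-- ===== VERDICT (by name: the statement is the Claim_ definition above) =====
theorem get_elements_after_keywords_spec : Claim_equal_get_elements_after_keywords := by
  intro data_array keywords _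
  unfold Spec_get_elements_after_keywords
  unfold get_elements_after_keywords get_elements_after_keywords_alt
  -- A's fold is a fold of inserts with key-determined values
  have hA : (keywords.foldl (fun results keyword =>
      match aInner keyword data_array with
      | some v => results.insert keyword v
      | none => results.insert keyword none) PySem.Dict.empty) =
      keywords.foldl (fun d k => d.insert k ((aInner k data_array).getD none)) PySem.Dict.empty := by
    apply List.foldl_ext
    intro d k _
    cases h : aInner k data_array <;> simp_all
  rw [hA]
  set F : String → Option String := fun k => (aInner k data_array).getD none with hF
  set dA := keywords.foldl (fun d k => d.insert k (F k)) PySem.Dict.empty with hdA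
  set d0 := keywords.foldl (fun d k => d.insert k (none : Option String)) PySem.Dict.empty with hd0
  have hkeysA : dA.keys = PySem.List.dedup keywords := by
    rw [hdA, PySem.Dict.keys_foldl_insert, PySem.Dict.keys_empty, PySem.Set.update_nil_left,
      PySem.List.dedup_eq_ofList]
  have hkeys0 : d0.keys = PySem.List.dedup keywords := by
    rw [hd0, PySem.Dict.keys_foldl_insert, PySem.Dict.keys_empty, PySem.Set.update_nil_left,
      PySem.List.dedup_eq_ofList]
  have hndA : dA.keys.Nodup :=
    PySem.Dict.nodup_keys_foldl_insert _ _ _ PySem.Dict.nodup_keys_empty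
  have hnd0 : d0.keys.Nodup :=
    PySem.Dict.nodup_keys_foldl_insert _ _ _ PySem.Dict.nodup_keys_empty
  have hc0 : ∀ j ∈ PySem.List.dedup keywords, d0.contains j = true := by
    intro j hj
    rw [PySem.Dict.contains_iff_mem_keys, hkeys0]
    exact hj
  have hd0getD : ∀ k, d0.getD k none = none := by
    intro k
    rw [hd0, getD_foldl_insert_fn (fun _ => none) keywords PySem.Dict.empty k]
    split <;> simp
  have hkeysB : (bSweep d0 (PySem.List.dedup keywords) data_array).keys = PySem.List.dedup keywords := by
    rw [bSweep_keys data_array d0 _ hc0, hkeys0]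
  have hndB : (bSweep d0 (PySem.List.dedup keywords) data_array).keys.Nodup := by
    rw [hkeysB, ← hkeys0]; exact hnd0
  rw [PySem.Dict.items_eq_map_keys dA hndA none,
    PySem.Dict.items_eq_map_keys _ hndB none, hkeysA, hkeysB]
  apply List.map_congr_left
  intro k hk
  have hkmem : k ∈ keywords := (PySem.List.mem_dedup _ _).1 hk
  rw [bSweep_getD data_array d0 _ k hc0, hdA, getD_foldl_insert_fn F keywords _ k]
  simp [hkmem, hd0getD k, hF]
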